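-- pv_equiv track=rewrite | github.com/Quillar/ExtensionsGolomb | BFlagrange.py | golP3
-- ===== SOURCE A (Python) =====
-- def golP3(n):
--     x1,x2,x3,x4,s = 1,1,1,1,0
--     while (x1<n):
--         x2=1
--         while (x2<n):
--             x3=1
--             while((x3<n) and (n-x1-x2-x3>0)):
--                 x4=n-x1-x2-x3
--                 if((x1!=x2 or x2!=x3 or x3!=x1) and(x1!=x2 or x2!=x4 or x4!=x1) and(x1!=x3 or x3!=x4 or x4!=x1) and(x2!=x3 or x3!=x4 or x4!=x2) and(x1!=x2 or x2!=x3+x4 or x3+x4!=x1) and(x1!=x4 or x4!=x2+x3 or x2+x3!=x1) and(x3!=x4 or x4!=x1+x2 or x1+x2!=x3) and(x1!=x2+x3 or x2+x3!=x3+x4 or x3+x4!=x1) and(x4!=x1+x2 or x1+x2!=x2+x3 or x2+x3!=x4) and(x1+x2!=x2+x3 or x2+x3!=x3+x4 or x3+x4!=x1+x2)):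
--                     s+=1
--                 x3+=1
--             x2+=1
--         x1+=1
--     return s
-- ===== SOURCE B (Python) =====
-- def golP3(n):
--     # Inner loop over x3 replaced by closed-form counting: for fixed (a, b),
--     # each forbidden pattern pins down at most one bad value of x3, except the
--     # pattern x1=x2=x3+x4 which (when a==b and n==3a) forbids every x3.
--     s = 0
--     for a in range(1, n):
--         for b in range(1, n):
--             m = n - a - b - 1          # x3 ranges over 1..m
--             if m < 1:
--                 continue
--             if a == b and n == 3 * a:
--                 continue               # x1=x2=x3+x4 holds for every x3
--             bad = set()
--             if a == b:
--                 bad.add(a)             # x1=x2=x3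
--                 bad.add(n - 3 * a)     # x1=x2=x4
--             if b == n - 3 * a:
--                 bad.add(a)             # x1=x3=x4
--             if a == n - 3 * b:
--                 bad.add(b)             # x2=x3=x4
--             if n == 3 * a or n == 2 * a + b:
--                 bad.add(a - b)         # x1=x4=x2+x3 / x1=x2+x3=x3+x4
--             if n == 3 * (a + b):
--                 bad.add(a + b)         # x3=x4=x1+x2
--             if n == 3 * a + 2 * b or n == 2 * (a + b):
--                 bad.add(a)             # x4=x1+x2=x2+x3 / x1+x2=x2+x3=x3+x4
--             s += m - sum(1 for c in bad if 1 <= c <= m)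
--     return s
-- ===== Notes on version B (the rewrite author's own statement) =====
-- stated objective: faster
-- what changed: A's innermost while-loop over x3 is replaced by a closed-form count: for each (x1,x2) the forbidden x3 values form a small explicit set (each equal-triple pattern pins down at most one x3, except x1=x2=x3+x4 which, when x1=x2 and n=3*x1, forbids every x3), so B adds m minus the number of forbidden values in range instead of scanning all x3.
import Mathlib
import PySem

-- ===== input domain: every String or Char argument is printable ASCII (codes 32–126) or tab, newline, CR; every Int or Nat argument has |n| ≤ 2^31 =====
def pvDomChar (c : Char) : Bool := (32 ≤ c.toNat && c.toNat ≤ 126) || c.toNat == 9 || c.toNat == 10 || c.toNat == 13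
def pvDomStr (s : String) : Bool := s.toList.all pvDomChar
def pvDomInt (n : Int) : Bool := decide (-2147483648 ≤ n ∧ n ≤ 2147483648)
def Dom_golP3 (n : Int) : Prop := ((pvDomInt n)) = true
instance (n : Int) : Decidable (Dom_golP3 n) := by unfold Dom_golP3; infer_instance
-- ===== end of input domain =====

-- B removes A's innermost loop: for each (x1,x2) it counts the admissible x3 in
-- closed form via a small set of forbidden x3 values (objective: faster).

-- ===== PORT A =====
-- A's big inline guard, named so the loop stays readable (same clause order as the Python).
def pvOkA (x1 x2 x3 x4 : Int) : Bool :=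
  (x1 != x2 || x2 != x3 || x3 != x1) &&
  (x1 != x2 || x2 != x4 || x4 != x1) &&
  (x1 != x3 || x3 != x4 || x4 != x1) &&
  (x2 != x3 || x3 != x4 || x4 != x2) &&
  (x1 != x2 || x2 != x3 + x4 || x3 + x4 != x1) &&
  (x1 != x4 || x4 != x2 + x3 || x2 + x3 != x1) &&
  (x3 != x4 || x4 != x1 + x2 || x1 + x2 != x3) &&
  (x1 != x2 + x3 || x2 + x3 != x3 + x4 || x3 + x4 != x1) &&
  (x4 != x1 + x2 || x1 + x2 != x2 + x3 || x2 + x3 != x4) &&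
  (x1 + x2 != x2 + x3 || x2 + x3 != x3 + x4 || x3 + x4 != x1 + x2)

-- innermost while: while x3 < n and n - x1 - x2 - x3 > 0
def golP3_loop3 (n x1 x2 x3 s : Int) : Int :=
  if h : x3 < n ∧ n - x1 - x2 - x3 > 0 then
    let x4 := n - x1 - x2 - x3
    golP3_loop3 n x1 x2 (x3 + 1) (if pvOkA x1 x2 x3 x4 then s + 1 else s)
  else s
termination_by (n - x3).toNat
decreasing_by omega

-- middle while: while x2 < n  (x3 restarts at 1)
def golP3_loop2 (n x1 x2 s : Int) : Int :=
  if h : x2 < n then golP3_loop2 n x1 (x2 + 1) (golP3_loop3 n x1 x2 1 s) else s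
termination_by (n - x2).toNat
decreasing_by omega

-- outer while: while x1 < n  (x2 restarts at 1)
def golP3_loop1 (n x1 s : Int) : Int :=
  if h : x1 < n then golP3_loop1 n (x1 + 1) (golP3_loop2 n x1 1 s) else s
termination_by (n - x1).toNat
decreasing_by omega

def golP3 (n : Int) : Int := golP3_loop1 n 1 0

-- ===== PORT B =====
-- the Python set 'bad' of forbidden x3 values for a fixed (a, b)
def pvBad (n a b : Int) : PySem.Set Int :=
  let bad : PySem.Set Int := PySem.Set.empty
  let bad := if a == b then PySem.Set.add (PySem.Set.add bad a) (n - 3 * a) else bad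
  let bad := if b == n - 3 * a then PySem.Set.add bad a else bad
  let bad := if a == n - 3 * b then PySem.Set.add bad b else bad
  let bad := if n == 3 * a || n == 2 * a + b then PySem.Set.add bad (a - b) else bad
  let bad := if n == 3 * (a + b) then PySem.Set.add bad (a + b) else bad
  let bad := if n == 3 * a + 2 * b || n == 2 * (a + b) then PySem.Set.add bad a else bad
  bad

-- loop body for one (a, b): m minus the number of bad values inside 1..m
def pvBodyB (n a b s : Int) : Int :=
  let m := n - a - b - 1
  if m < 1 then s
  else if a == b && n == 3 * a then s
  else s + (m - (pvBad n a b).foldl (fun t c => if 1 ≤ c ∧ c ≤ m then t + 1 else t) 0)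

def golP3_alt (n : Int) : Int :=
  (PySem.List.pyRange 1 n 1).foldl (fun s a =>
    (PySem.List.pyRange 1 n 1).foldl (fun s b => pvBodyB n a b s) s) 0

-- ===== PRECONDITION & SPEC =====
def Spec_golP3 (n : Int) (out : Int) : Prop := out = golP3_alt n
instance (n : Int) (out : Int) : Decidable (Spec_golP3 n out) := by unfold Spec_golP3; infer_instance

-- ===== CLAIM (what is proved, stated in full; the proofs are below) =====
def Claim_equal_golP3 : Prop := ∀ (n : Int), Dom_golP3 n → Spec_golP3 n (golP3 n)

-- ===== LEMMAS AND PROOFS =====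
theorem pvF1 (n a b c : Int) (c1 : (a ≠ b ∨ b ≠ c) ∨ c ≠ a) (h1 : a = b) (h2 : c = a) : False := by omega
theorem pvF2 (n a b c : Int) (c2 : (a ≠ b ∨ b ≠ n - a - b - c) ∨ n - a - b - c ≠ a) (h1 : a = b) (h2 : c = n - 3 * a) : False := by omega
theorem pvF3 (n a b c : Int) (c3 : (a ≠ c ∨ c ≠ n - a - b - c) ∨ n - a - b - c ≠ a) (h1 : b = n - 3 * a) (h2 : c = a) : False := by omega
theorem pvF4 (n a b c : Int) (c4 : (b ≠ c ∨ c ≠ n - a - b - c) ∨ n - a - b - c ≠ b) (h1 : a = n - 3 * b) (h2 : c = b) : False := by omega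
theorem pvF5 (n a b c : Int) (c6 : (a ≠ n - a - b - c ∨ n - a - b - c ≠ b + c) ∨ b + c ≠ a) (h1 : n = 3 * a) (h2 : c = a - b) : False := by omega
theorem pvF6 (n a b c : Int) (c8 : (a ≠ b + c ∨ b + c ≠ c + (n - a - b - c)) ∨ c + (n - a - b - c) ≠ a) (h1 : n = 2 * a + b) (h2 : c = a - b) : False := by omega
theorem pvF7 (n a b c : Int) (c7 : (c ≠ n - a - b - c ∨ n - a - b - c ≠ a + b) ∨ a + b ≠ c) (h1 : n = 3 * (a + b)) (h2 : c = a + b) : False := by omega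
theorem pvF8 (n a b c : Int) (c9 : (n - a - b - c ≠ a + b ∨ a + b ≠ b + c) ∨ b + c ≠ n - a - b - c) (h1 : n = 3 * a + 2 * b) (h2 : c = a) : False := by omega
theorem pvF9 (n a b c : Int) (c10 : (a + b ≠ b + c ∨ b + c ≠ c + (n - a - b - c)) ∨ c + (n - a - b - c) ≠ a + b) (h1 : n = 2 * (a + b)) (h2 : c = a) : False := by omega

theorem pvB1 (n a b c : Int) (n1 : ¬(a = b ∧ (c = a ∨ c = n - 3 * a))) : (a ≠ b ∨ b ≠ c) ∨ c ≠ a := by omega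
theorem pvB2 (n a b c : Int) (n1 : ¬(a = b ∧ (c = a ∨ c = n - 3 * a))) : (a ≠ b ∨ b ≠ n - a - b - c) ∨ n - a - b - c ≠ a := by omega
theorem pvB3 (n a b c : Int) (n2 : ¬(b = n - 3 * a ∧ c = a)) : (a ≠ c ∨ c ≠ n - a - b - c) ∨ n - a - b - c ≠ a := by omega
theorem pvB4 (n a b c : Int) (n3 : ¬(a = n - 3 * b ∧ c = b)) : (b ≠ c ∨ c ≠ n - a - b - c) ∨ n - a - b - c ≠ b := by omega
theorem pvB5 (n a b c : Int) (hno : ¬(a = b ∧ n = 3 * a)) : (a ≠ b ∨ b ≠ c + (n - a - b - c)) ∨ c + (n - a - b - c) ≠ a := by omega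
theorem pvB6 (n a b c : Int) (n4 : ¬((n = 3 * a ∨ n = 2 * a + b) ∧ c = a - b)) : (a ≠ n - a - b - c ∨ n - a - b - c ≠ b + c) ∨ b + c ≠ a := by omega
theorem pvB7 (n a b c : Int) (n5 : ¬(n = 3 * (a + b) ∧ c = a + b)) : (c ≠ n - a - b - c ∨ n - a - b - c ≠ a + b) ∨ a + b ≠ c := by omega
theorem pvB8 (n a b c : Int) (n4 : ¬((n = 3 * a ∨ n = 2 * a + b) ∧ c = a - b)) : (a ≠ b + c ∨ b + c ≠ c + (n - a - b - c)) ∨ c + (n - a - b - c) ≠ a := by omega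
theorem pvB9 (n a b c : Int) (n6 : ¬((n = 3 * a + 2 * b ∨ n = 2 * (a + b)) ∧ c = a)) : (n - a - b - c ≠ a + b ∨ a + b ≠ b + c) ∨ b + c ≠ n - a - b - c := by omega
theorem pvB10 (n a b c : Int) (n6 : ¬((n = 3 * a + 2 * b ∨ n = 2 * (a + b)) ∧ c = a)) : (a + b ≠ b + c ∨ b + c ≠ c + (n - a - b - c)) ∨ c + (n - a - b - c) ≠ a + b := by omega

theorem pv_ok_iff (n a b c : Int) (hno : ¬(a = b ∧ n = 3 * a)) :
    pvOkA a b c (n - a - b - c) = true ↔ ¬(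
      (a = b ∧ (c = a ∨ c = n - 3 * a)) ∨ (b = n - 3 * a ∧ c = a) ∨
      (a = n - 3 * b ∧ c = b) ∨ ((n = 3 * a ∨ n = 2 * a + b) ∧ c = a - b) ∨
      (n = 3 * (a + b) ∧ c = a + b) ∨ ((n = 3 * a + 2 * b ∨ n = 2 * (a + b)) ∧ c = a)) := by
  simp only [pvOkA, Bool.and_eq_true, Bool.or_eq_true, bne_iff_ne, ne_eq]
  constructor
  · rintro ⟨⟨⟨⟨⟨⟨⟨⟨⟨c1, c2⟩, c3⟩, c4⟩, c5⟩, c6⟩, c7⟩, c8⟩, c9⟩, c10⟩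
    rintro (⟨hab, hc | hc⟩ | ⟨h1, h2⟩ | ⟨h1, h2⟩ | ⟨h1 | h1, h2⟩ | ⟨h1, h2⟩ | ⟨h1 | h1, h2⟩)
    · exact pvF1 n a b c c1 hab hc
    · exact pvF2 n a b c c2 hab hc
    · exact pvF3 n a b c c3 h1 h2
    · exact pvF4 n a b c c4 h1 h2
    · exact pvF5 n a b c c6 h1 h2
    · exact pvF6 n a b c c8 h1 h2
    · exact pvF7 n a b c c7 h1 h2
    · exact pvF8 n a b c c9 h1 h2
    · exact pvF9 n a b c c10 h1 h2
  · intro hn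
    have n1 : ¬(a = b ∧ (c = a ∨ c = n - 3 * a)) := fun h => hn (Or.inl h)
    have n2 : ¬(b = n - 3 * a ∧ c = a) := fun h => hn (Or.inr (Or.inl h))
    have n3 : ¬(a = n - 3 * b ∧ c = b) := fun h => hn (Or.inr (Or.inr (Or.inl h)))
    have n4 : ¬((n = 3 * a ∨ n = 2 * a + b) ∧ c = a - b) := fun h => hn (Or.inr (Or.inr (Or.inr (Or.inl h))))
    have n5 : ¬(n = 3 * (a + b) ∧ c = a + b) := fun h => hn (Or.inr (Or.inr (Or.inr (Or.inr (Or.inl h)))))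
    have n6 : ¬((n = 3 * a + 2 * b ∨ n = 2 * (a + b)) ∧ c = a) := fun h => hn (Or.inr (Or.inr (Or.inr (Or.inr (Or.inr h)))))
    exact ⟨⟨⟨⟨⟨⟨⟨⟨⟨pvB1 n a b c n1, pvB2 n a b c n1⟩, pvB3 n a b c n2⟩, pvB4 n a b c n3⟩,
      pvB5 n a b c hno⟩, pvB6 n a b c n4⟩, pvB7 n a b c n5⟩, pvB8 n a b c n4⟩,
      pvB9 n a b c n6⟩, pvB10 n a b c n6⟩

theorem pv_ok_false (n a c : Int) (h3 : n = 3 * a) : pvOkA a a c (n - a - a - c) = false := by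
  have h5 : (a != a || a != c + (n - a - a - c) || c + (n - a - a - c) != a) = false := by
    have he : c + (n - a - a - c) = a := by omega
    rw [he]; simp
  simp only [pvOkA, h5]
  simp
theorem pv_mem_ite_add2 {g : Prop} [Decidable g] (v1 v2 x : Int) :
    (x ∈ if g then PySem.Set.add (PySem.Set.add ([] : PySem.Set Int) v1) v2
          else ([] : PySem.Set Int)) ↔ (g ∧ (x = v1 ∨ x = v2)) := by
  split_ifs with h <;>
    simp [PySem.Set.mem_add, h] <;> tauto

theorem pv_mem_ite_add {g : Prop} [Decidable g] (s : PySem.Set Int) (v x : Int) :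
    (x ∈ if g then PySem.Set.add s v else s) ↔ ((g ∧ x = v) ∨ x ∈ s) := by
  split_ifs with h <;> simp [PySem.Set.mem_add, h] <;> tauto

theorem pv_nodup_ite_add {g : Prop} [Decidable g] (s : PySem.Set Int) (v : Int)
    (hs : s.Nodup) : (if g then PySem.Set.add s v else s).Nodup := by
  split_ifs
  · apply PySem.Set.nodup_add; exact hs
  · exact hs

theorem pv_mem_pvBad (n a b x : Int) :
    x ∈ pvBad n a b ↔
      (a = b ∧ (x = a ∨ x = n - 3 * a)) ∨ (b = n - 3 * a ∧ x = a) ∨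
      (a = n - 3 * b ∧ x = b) ∨ ((n = 3 * a ∨ n = 2 * a + b) ∧ x = a - b) ∨
      (n = 3 * (a + b) ∧ x = a + b) ∨ ((n = 3 * a + 2 * b ∨ n = 2 * (a + b)) ∧ x = a) := by
  simp only [pvBad, PySem.Set.empty, pv_mem_ite_add, pv_mem_ite_add2,
    beq_iff_eq, Bool.or_eq_true]
  tauto

theorem pv_nodup_pvBad (n a b : Int) : (pvBad n a b).Nodup := by
  unfold pvBad
  apply pv_nodup_ite_add
  apply pv_nodup_ite_add
  apply pv_nodup_ite_add
  apply pv_nodup_ite_add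
  apply pv_nodup_ite_add
  split_ifs
  · apply PySem.Set.nodup_add; apply PySem.Set.nodup_add; exact List.nodup_nil
  · exact List.nodup_nil
theorem pv_countP_or (R : List Int) (p q : Int → Bool)
    (h : ∀ x, p x = true → q x = false) :
    R.countP (fun x => p x || q x) = R.countP p + R.countP q := by
  induction R with
  | nil => simp
  | cons y R ih =>
    simp only [List.countP_cons, ih]
    cases hp : p y <;> cases hq : q y <;> simp_all <;> omega

theorem pv_fold_count (L : List Int) (m t : Int) :
    L.foldl (fun t c => if 1 ≤ c ∧ c ≤ m then t + 1 else t) t =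
      t + (L.countP (fun c => decide (1 ≤ c ∧ c ≤ m)) : Int) := by
  induction L generalizing t with
  | nil => simp
  | cons y L ih =>
    rw [List.foldl_cons, List.countP_cons]
    by_cases h : 1 ≤ y ∧ y ≤ m
    · rw [if_pos h, ih, if_pos (by simpa using h)]
      push_cast; ring
    · rw [if_neg h, ih, if_neg (by simpa using h)]
      simp

theorem pv_count_mem (L : List Int) (hL : L.Nodup) (a b : Int) :
    (PySem.List.pyRange a b 1).countP (fun x => decide (x ∈ L)) =
      L.countP (fun c => decide (a ≤ c ∧ c < b)) := by
  induction L with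
  | nil => simp
  | cons y L ih =>
    rcases List.nodup_cons.mp hL with ⟨hy, hL'⟩
    have h1 : (PySem.List.pyRange a b 1).countP (fun x => decide (x ∈ y :: L)) =
        (PySem.List.pyRange a b 1).countP (fun x => (x == y) || decide (x ∈ L)) := by
      apply List.countP_congr
      intro x _
      simp [List.mem_cons]
    rw [h1, pv_countP_or _ _ _ (by
      intro x hx
      have hxy : x = y := by simpa using hx
      subst hxy
      simpa using hy)]
    rw [ih hL']
    have h2 : (PySem.List.pyRange a b 1).countP (fun x => x == y) =
        (if a ≤ y ∧ y < b then 1 else 0) := by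
      have hcnt : (PySem.List.pyRange a b 1).countP (fun x => x == y) =
          (PySem.List.pyRange a b 1).count y := by
        rw [List.count_eq_countP]
      rw [hcnt]
      by_cases hmem : y ∈ PySem.List.pyRange a b 1
      · rw [List.count_eq_one_of_mem (PySem.List.nodup_pyRange_one a b) hmem]
        rw [PySem.List.mem_pyRange_one] at hmem
        simp [hmem]
      · rw [List.count_eq_zero_of_not_mem hmem]
        rw [PySem.List.mem_pyRange_one] at hmem
        simp [hmem]
    rw [h2, List.countP_cons]
    by_cases hyb : a ≤ y ∧ y < b
    · rw [if_pos hyb, if_pos (by simpa using hyb)]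
      omega
    · rw [if_neg hyb, if_neg (by simpa using hyb)]
      omega

theorem pv_countP_not (R : List Int) (p : Int → Bool) :
    R.countP (fun x => !(p x)) + R.countP p = R.length := by
  induction R with
  | nil => simp
  | cons y R ih =>
    simp only [List.countP_cons, List.length_cons]
    cases hp : p y <;> simp_all <;> omega

-- the innermost while loop counts the x3 accepted by A's guard  (needs 1 ≤ x1, 1 ≤ x2)
theorem pv_loop3_eq (n a b x3 s : Int) (ha : 1 ≤ a) (hb : 1 ≤ b) :
    golP3_loop3 n a b x3 s =
      s + ((PySem.List.pyRange x3 (n - a - b) 1).countP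
            (fun c => pvOkA a b c (n - a - b - c)) : Int) := by
  fun_induction golP3_loop3 n a b x3 s with
  | case1 x3 s h x4 ih =>
    simp only [dite_eq_ite] at ih
    rw [ih, PySem.List.pyRange_one_cons (show x3 < n - a - b by omega), List.countP_cons]
    by_cases hok : pvOkA a b x3 (n - a - b - x3) = true
    · rw [if_pos hok, if_pos hok]
      push_cast; ring
    · rw [if_neg hok, if_neg hok]
      simp
  | case2 x3 s h =>
    rw [PySem.List.pyRange_one_eq_nil (show n - a - b ≤ x3 by omega)]
    simp

-- per (x1, x2) pair: A's inner loop equals B's closed-form body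
theorem pv_inner_eq (n a b s : Int) (ha : 1 ≤ a) (hb : 1 ≤ b) :
    golP3_loop3 n a b 1 s = pvBodyB n a b s := by
  rw [pv_loop3_eq n a b 1 s ha hb]
  show s + _ = (if n - a - b - 1 < 1 then s else _)
  by_cases hm : n - a - b - 1 < 1
  · rw [if_pos hm, PySem.List.pyRange_one_eq_nil (by omega)]
    simp
  · rw [if_neg hm]
    by_cases h5 : a = b ∧ n = 3 * a
    · have hg : ((a == b && n == 3 * a)) = true := by
        simp [h5.1, h5.2]
      rw [hg, if_pos rfl]
      have hz : (PySem.List.pyRange 1 (n - a - b) 1).countP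
          (fun c => pvOkA a b c (n - a - b - c)) = 0 := by
        apply List.countP_eq_zero.mpr
        intro c hcmem
        rcases h5 with ⟨rfl, h3⟩
        simp [pv_ok_false n a c h3]
      rw [hz]; simp
    · have hg : ((a == b && n == 3 * a)) = false := by
        rcases not_and_or.mp h5 with h | h <;> simp [h]
      rw [hg]
      simp only [Bool.false_eq_true, if_false]
      have hcong : (PySem.List.pyRange 1 (n - a - b) 1).countP
            (fun c => pvOkA a b c (n - a - b - c)) =
          (PySem.List.pyRange 1 (n - a - b) 1).countP
            (fun c => !(decide (c ∈ pvBad n a b))) := by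
        apply List.countP_congr
        intro c _
        rw [pv_ok_iff n a b c h5, Bool.not_eq_eq_eq_not, Bool.not_true, decide_eq_false_iff_not,
          pv_mem_pvBad]
      rw [hcong, pv_fold_count (pvBad n a b) (n - a - b - 1) 0]
      have h1 : (PySem.List.pyRange 1 (n - a - b) 1).countP
            (fun c => !(decide (c ∈ pvBad n a b))) +
          (PySem.List.pyRange 1 (n - a - b) 1).countP (fun c => decide (c ∈ pvBad n a b)) =
          (PySem.List.pyRange 1 (n - a - b) 1).length :=
        pv_countP_not _ _
      have h2 : (PySem.List.pyRange 1 (n - a - b) 1).length = (n - a - b - 1).toNat :=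
        PySem.List.length_pyRange_one 1 (n - a - b)
      have h3 : (PySem.List.pyRange 1 (n - a - b) 1).countP
            (fun c => decide (c ∈ pvBad n a b)) =
          (pvBad n a b).countP (fun c => decide (1 ≤ c ∧ c ≤ n - a - b - 1)) := by
        rw [pv_count_mem (pvBad n a b) (pv_nodup_pvBad n a b) 1 (n - a - b)]
        apply List.countP_congr
        intro c _
        constructor <;> (intro h; simp at h ⊢; omega)
      omega

-- middle while loop = fold of B's body over range(1, n)  (invariant: 1 ≤ x1, 1 ≤ x2)
theorem pv_loop2_eq (n a b s : Int) (ha : 1 ≤ a) (hb : 1 ≤ b) :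
    golP3_loop2 n a b s =
      (PySem.List.pyRange b n 1).foldl (fun s b => pvBodyB n a b s) s := by
  fun_induction golP3_loop2 n a b s with
  | case1 b s h ih =>
    rw [PySem.List.pyRange_one_cons (show b < n by omega), List.foldl_cons, ih (by omega)]
    congr 1
    exact pv_inner_eq n a b s ha hb
  | case2 b s h =>
    rw [PySem.List.pyRange_one_eq_nil (show n ≤ b by omega)]
    simp

-- outer while loop = B's double fold  (invariant: 1 ≤ x1)
theorem pv_loop1_eq (n a s : Int) (ha : 1 ≤ a) :
    golP3_loop1 n a s =
      (PySem.List.pyRange a n 1).foldl (fun s a =>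
        (PySem.List.pyRange 1 n 1).foldl (fun s b => pvBodyB n a b s) s) s := by
  fun_induction golP3_loop1 n a s with
  | case1 a s h ih =>
    rw [PySem.List.pyRange_one_cons (show a < n by omega), List.foldl_cons, ih (by omega)]
    congr 1
    exact pv_loop2_eq n a 1 s ha (by omega)
  | case2 a s h =>
    rw [PySem.List.pyRange_one_eq_nil (show n ≤ a by omega)]
    simp

-- ===== VERDICT (by name: the statement is the Claim_ definition above) =====
theorem golP3_spec : Claim_equal_golP3 := by
  intro n _
  unfold Spec_golP3 golP3 golP3_alt
  exact pv_loop1_eq n 1 0 (by omega)
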